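-- pv_equiv track=rewrite | github.com/ANchangwan/Algorithm-for-Python | 프로그래머스/카카오/lever2/level2/수식최대화.py | solution
-- ===== SOURCE A (Python) =====
-- from itertools import permutations
--
-- def solution(expression):
--     operators = ["*", "+", "-"]
--     answer = []
--     for oper in permutations(operators, 3):
--         a = oper[0]
--         b = oper[1]
--         tmp_list = []
--         for i in expression.split(a):
--             tmp = [f"({j})" for j in i.split(b)]
--             tmp_list.append(f"{b.join(tmp)}")
--         answer.append(a.join(tmp_list))
--     return answer
-- ===== SOURCE B (Python) =====
-- from itertools import permutations
--
-- def solution(expression):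
--     answer = []
--     for a, b, _ in permutations("*+-", 3):
--         out = []
--         cur = []
--         for ch in expression:
--             if ch == a or ch == b:
--                 out.append("(" + "".join(cur) + ")")
--                 out.append(ch)
--                 cur = []
--             else:
--                 cur.append(ch)
--         out.append("(" + "".join(cur) + ")")
--         answer.append("".join(out))
--     return answer
-- ===== Notes on version B (the rewrite author's own statement) =====
-- stated objective: alternative
-- what changed: Replaces A's nested split-by-first-operator / split-by-second-operator / wrap / double-join passes with a single left-to-right character scan per operator pair that emits each parenthesized piece and the operator as it goes.
import Mathlib
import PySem

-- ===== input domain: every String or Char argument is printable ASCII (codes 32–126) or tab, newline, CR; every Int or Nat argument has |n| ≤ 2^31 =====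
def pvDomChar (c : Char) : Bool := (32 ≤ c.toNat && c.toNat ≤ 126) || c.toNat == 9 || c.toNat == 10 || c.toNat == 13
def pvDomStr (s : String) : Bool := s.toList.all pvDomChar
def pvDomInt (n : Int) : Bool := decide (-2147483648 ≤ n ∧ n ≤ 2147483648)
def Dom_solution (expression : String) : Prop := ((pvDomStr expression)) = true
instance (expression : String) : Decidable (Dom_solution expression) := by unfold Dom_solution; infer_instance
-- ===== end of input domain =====

-- B replaces A's nested split/split/join passes by a single left-to-right tokenizing scan per operator pair (objective: alternative decomposition, same output).

-- ===== PORT A =====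
def solution (expression : String) : List String :=
  let operators : List String := ["*", "+", "-"]
  (PySem.List.permutations operators 3).foldl (fun answer oper =>
    let a := PySem.List.pyGetD oper 0 ""
    let b := PySem.List.pyGetD oper 1 ""
    let tmp_list := (PySem.Chars.splitOn expression.toList a.toList).foldl
      (fun tmp_list i =>
        let tmp := (PySem.Chars.splitOn i b.toList).map (fun j => '(' :: j ++ [')'])
        tmp_list ++ [PySem.Chars.join b.toList tmp]) []
    answer ++ [String.ofList (PySem.Chars.join a.toList tmp_list)]) []

-- ===== PORT B =====
def solution_alt (expression : String) : List String :=
  (PySem.List.permutations "*+-".toList 3).foldl (fun answer oper =>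
    let a := PySem.List.pyGetD oper 0 ' '
    let b := PySem.List.pyGetD oper 1 ' '
    let st := expression.toList.foldl
      (fun (st : List (List Char) × List Char) ch =>
        if ch = a ∨ ch = b then (st.1 ++ [('(' :: st.2) ++ [')'], [ch]], ([] : List Char))
        else (st.1, st.2 ++ [ch])) ([], [])
    answer ++ [String.ofList (PySem.Chars.join [] (st.1 ++ ['(' :: st.2 ++ [')']]))]) []

-- ===== PRECONDITION & SPEC =====
def Spec_solution (expression : String) (out : List String) : Prop := out = solution_alt expression
instance (expression : String) (out : List String) : Decidable (Spec_solution expression out) := by unfold Spec_solution; infer_instance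

-- ===== CLAIM (what is proved, stated in full; the proofs are below) =====
def Claim_equal_solution : Prop := ∀ (expression : String), Dom_solution expression → Spec_solution expression (solution expression)

-- ===== LEMMAS AND PROOFS =====

-- simple structural recursion equal to Python's single-char str.split
def sp (a : Char) : List Char → List (List Char)
  | [] => [[]]
  | c :: t => if c = a then [] :: sp a t else (sp a t).modifyHead (c :: ·)

def wrapP (p : List Char) : List Char := '(' :: p ++ [')']

def gB (b : Char) (p : List Char) : List Char :=
  PySem.Chars.join [b] ((sp b p).map wrapP)

def fA (a b : Char) (l : List Char) : List Char :=
  PySem.Chars.join [a] ((sp a l).map (gB b))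

-- the common middle: B's scan with pending piece cur
def spine (a b : Char) : List Char → List Char → List Char
  | cur, [] => wrapP cur
  | cur, c :: t => if c = a ∨ c = b then wrapP cur ++ c :: spine a b [] t else spine a b (cur ++ [c]) t

theorem modifyHead_fun_id {α : Type} (l : List α) : l.modifyHead (fun x => x) = l := by
  cases l <;> simp

theorem go_sp (a : Char) : ∀ (l : List Char) (fuel : Nat), l.length < fuel →
    ∀ (cur : List Char) (acc : List (List Char)),
    PySem.Chars.splitOn.go [a] fuel l cur acc = acc.reverse ++ (sp a l).modifyHead (cur.reverse ++ ·)
  | [], fuel + 1, _, cur, acc => by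
      simp [PySem.Chars.splitOn.go, sp]
  | c :: t, fuel + 1, h, cur, acc => by
      have ht : t.length < fuel := by simpa using h
      by_cases hc : c = a
      · subst hc
        simp [PySem.Chars.splitOn.go, sp, go_sp c t fuel ht, modifyHead_fun_id]
      · have hpre : ([a].isPrefixOf (c :: t)) = false := by
          simp [List.isPrefixOf]
          intro hh; exact hc hh.symm
        simp [PySem.Chars.splitOn.go, sp, hpre, hc, go_sp a t fuel ht, List.modifyHead_modifyHead]
        cases sp a t <;> simp

theorem splitOn_eq_sp (a : Char) (l : List Char) : PySem.Chars.splitOn l [a] = sp a l := by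
  have := go_sp a l (l.length + 1) (by omega) [] []
  simpa [modifyHead_fun_id] using this

theorem sp_ne_nil (a : Char) (l : List Char) : sp a l ≠ [] := by
  induction l with
  | nil => simp [sp]
  | cons c t ih =>
    by_cases hc : c = a
    · simp [sp, hc]
    · simp only [sp, if_neg hc]
      cases h : sp a t with
      | nil => exact absurd h ih
      | cons x r => simp

theorem sp_prefix (a : Char) (p l : List Char) (hp : a ∉ p) :
    sp a (p ++ l) = (sp a l).modifyHead (p ++ ·) := by
  induction p with
  | nil => simp [modifyHead_fun_id]
  | cons c q ih =>
    have hc : c ≠ a := by intro h; exact hp (by simp [h])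
    have hq : a ∉ q := fun h => hp (by simp [h])
    simp [sp, hc, ih hq, List.modifyHead_modifyHead]
    cases sp a l <;> simp

theorem sp_no (a : Char) (l : List Char) (h : a ∉ l) : sp a l = [l] := by
  have := sp_prefix a l [] h
  simpa [sp] using this

theorem join_head_append (s x y : List Char) (L : List (List Char)) :
    PySem.Chars.join s ((x ++ y) :: L) = x ++ PySem.Chars.join s (y :: L) := by
  cases L with
  | nil => simp [PySem.Chars.join_singleton]
  | cons z r => simp [PySem.Chars.join_cons_cons, List.append_assoc]

theorem join_cons_eq (a : Char) (x : List Char) (L : List (List Char)) (h : L ≠ []) :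
    PySem.Chars.join [a] (x :: L) = x ++ a :: PySem.Chars.join [a] L := by
  cases L with
  | nil => exact absurd rfl h
  | cons z r => simp [PySem.Chars.join_cons_cons]

theorem gB_no (b : Char) (q : List Char) (h : b ∉ q) : gB b q = wrapP q := by
  simp [gB, sp_no b q h, PySem.Chars.join_singleton]

theorem gB_mid (b : Char) (q h : List Char) (hq : b ∉ q) :
    gB b (q ++ b :: h) = wrapP q ++ b :: gB b h := by
  have h1 : sp b (q ++ b :: h) = q :: sp b h := by
    rw [sp_prefix b q (b :: h) hq]
    simp [sp]
  have h2 : (sp b h).map wrapP ≠ [] := by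
    simp [sp_ne_nil]
  simp only [gB, h1, List.map_cons]
  rw [join_cons_eq b (wrapP q) _ h2]

theorem fA_spine (a b : Char) (hab : a ≠ b) :
    ∀ (l cur : List Char), a ∉ cur → b ∉ cur → fA a b (cur ++ l) = spine a b cur l
  | [], cur, ha, hb => by
      simp [fA, List.append_nil, sp_no a cur ha, PySem.Chars.join_singleton, gB_no b cur hb, spine]
  | c :: t, cur, ha, hb => by
      by_cases hca : c = a
      · subst hca
        have h1 : sp c (cur ++ c :: t) = cur :: sp c t := by
          rw [sp_prefix c cur (c :: t) ha]
          simp [sp]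
        have h2 : (sp c t).map (gB b) ≠ [] := by simp [sp_ne_nil]
        have iht := fA_spine c b hab t [] (by simp) (by simp)
        simp only [fA, h1, List.map_cons]
        rw [join_cons_eq c _ _ h2, gB_no b cur hb]
        simp only [spine]
        rw [← iht]
        simp [fA]
      · by_cases hcb : c = b
        · subst hcb
          obtain ⟨h0, r, hsp⟩ : ∃ h0 r, sp a t = h0 :: r := by
            cases h : sp a t with
            | nil => exact absurd h (sp_ne_nil a t)
            | cons x r => exact ⟨x, r, rfl⟩
          have h1 : sp a (cur ++ c :: t) = (cur ++ c :: h0) :: r := by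
            rw [sp_prefix a cur (c :: t) ha]
            simp only [sp, if_neg (show ¬ (c = a) from fun h => hab h.symm), hsp]
            simp
          have iht := fA_spine a c hab t [] (by simp) (by simp)
          simp only [fA, h1, List.map_cons]
          rw [gB_mid c cur h0 hb]
          have : wrapP cur ++ c :: gB c h0 = wrapP cur ++ ([c] ++ gB c h0) := by simp
          rw [this, ← List.append_assoc]
          rw [join_head_append]
          simp only [spine]
          rw [← iht]
          simp [fA, hsp]
        · have iht := fA_spine a b hab t (cur ++ [c])
            (by simp [ha]; exact fun h => hca h.symm)
            (by simp [hb]; exact fun h => hcb h.symm)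
          have : cur ++ c :: t = (cur ++ [c]) ++ t := by simp
          rw [this, iht]
          simp [spine, hca, hcb]

theorem join_nil_sep (L : List (List Char)) : PySem.Chars.join [] L = L.flatten := by
  induction L with
  | nil => simp [PySem.Chars.join, List.intercalate]
  | cons x r ih =>
    cases r with
    | nil => simp [PySem.Chars.join_singleton]
    | cons y q => simp [PySem.Chars.join_cons_cons] at *; simpa using ih

def stepF (a b : Char) (st : List (List Char) × List Char) (ch : Char) : List (List Char) × List Char :=
  if ch = a ∨ ch = b then (st.1 ++ ['(' :: st.2 ++ [')'], [ch]], []) else (st.1, st.2 ++ [ch])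

theorem B_inv (a b : Char) : ∀ (l : List Char) (P : List (List Char)) (cur : List Char),
    ((l.foldl (stepF a b) (P, cur)).1 ++ ['(' :: (l.foldl (stepF a b) (P, cur)).2 ++ [')']]).flatten
    = P.flatten ++ spine a b cur l
  | [], P, cur => by simp [spine, wrapP]
  | c :: t, P, cur => by
      by_cases h : c = a ∨ c = b
      · simp only [List.foldl_cons, stepF, if_pos h]
        rw [B_inv a b t (P ++ ['(' :: cur ++ [')'], [c]]) []]
        simp [spine, h, wrapP]
      · simp only [List.foldl_cons, stepF, if_neg h]
        rw [B_inv a b t P (cur ++ [c])]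
        have h1 : ¬ c = a := fun hh => h (Or.inl hh)
        have h2 : ¬ c = b := fun hh => h (Or.inr hh)
        simp [spine, h1, h2]

theorem pair_eq (a b : Char) (hab : a ≠ b) (l : List Char) :
    PySem.Chars.join [a] ((PySem.Chars.splitOn l [a]).foldl
      (fun tl i => tl ++ [PySem.Chars.join [b] ((PySem.Chars.splitOn i [b]).map (fun j => '(' :: j ++ [')']))]) [])
    = PySem.Chars.join [] ((l.foldl (stepF a b) ([], [])).1 ++ ['(' :: (l.foldl (stepF a b) ([], [])).2 ++ [')']])
    := by
  rw [join_nil_sep, B_inv a b l [] []]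
  have hw : (fun (j : List Char) => '(' :: j ++ [')']) = wrapP := by funext j; simp [wrapP]
  have hL : ∀ i, PySem.Chars.join [b] ((PySem.Chars.splitOn i [b]).map (fun j => '(' :: j ++ [')'])) = gB b i := by
    intro i
    rw [hw]; simp [gB, splitOn_eq_sp]
  rw [PySem.List.foldl_append_singleton_eq_map]
  have hmap : (PySem.Chars.splitOn l [a]).map
      (fun i => PySem.Chars.join [b] ((PySem.Chars.splitOn i [b]).map (fun j => '(' :: j ++ [')'])))
      = (sp a l).map (gB b) := by
    rw [splitOn_eq_sp]
    exact List.map_congr_left (fun i _ => hL i)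
  rw [hmap]
  have := fA_spine a b hab l [] (by simp) (by simp)
  simpa [fA] using this

def strA (a b : Char) (l : List Char) : String :=
  String.ofList (PySem.Chars.join [a] ((PySem.Chars.splitOn l [a]).foldl
    (fun tl i => tl ++ [PySem.Chars.join [b] ((PySem.Chars.splitOn i [b]).map (fun j => '(' :: j ++ [')']))]) []))

def strB (a b : Char) (l : List Char) : String :=
  String.ofList (PySem.Chars.join [] ((l.foldl (stepF a b) ([], [])).1 ++ ['(' :: (l.foldl (stepF a b) ([], [])).2 ++ [')']]))

theorem pair_eq' (a b : Char) (hab : a ≠ b) (l : List Char) : strA a b l = strB a b l :=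
  congrArg String.ofList (pair_eq a b hab l)

-- ===== VERDICT (by name: the statement is the Claim_ definition above) =====
theorem solution_spec : Claim_equal_solution := by
  intro e _
  show [strA '*' '+' e.toList, strA '*' '-' e.toList, strA '+' '*' e.toList,
        strA '+' '-' e.toList, strA '-' '*' e.toList, strA '-' '+' e.toList]
     = [strB '*' '+' e.toList, strB '*' '-' e.toList, strB '+' '*' e.toList,
        strB '+' '-' e.toList, strB '-' '*' e.toList, strB '-' '+' e.toList]
  simp only [List.cons.injEq, and_true]
  exact ⟨pair_eq' '*' '+' (by decide) e.toList, pair_eq' '*' '-' (by decide) e.toList,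
         pair_eq' '+' '*' (by decide) e.toList, pair_eq' '+' '-' (by decide) e.toList,
         pair_eq' '-' '*' (by decide) e.toList, pair_eq' '-' '+' (by decide) e.toList⟩
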